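-- pv_equiv track=rewrite | github.com/wcole3/DailyCodingChallenges | Hard/Problem5_05082022.py | solution
-- ===== SOURCE A (Python) =====
-- def solution(input : []):
--     # sort list in descending order
--     input.sort(reverse=True)
--     # go through list and check points on sides
--     for i in range(1, len(input)):
--         # if this number and previous were negative we can stop looping
--         if input[i - 1] < 0 and input[i] < 0:
--             break
--         if input[i - 1] - input[i] > 1:
--             # this value is more than 1 away from previous
--             # but we only want positive missing values
--             if input[i - 1] - 1 >= 0:
--                 return input[i - 1] - 1
--     # if we get here there were no missing values so the next missing
--     # value is based on the first value
--     return input[0] + 1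
-- ===== SOURCE B (Python) =====
-- def solution(input):
--     # alternative implementation: hash set + membership tests instead of sort-and-scan
--     # NOTE: A sorts `input` in place (caller-visible mutation); B does not mutate it.
--     s = set(input)
--     lo = min(s)
--     cands = [a for a in s if a >= 1 and (a - 1) not in s and lo < a - 1]
--     return (max(cands) - 1) if cands else (max(s) + 1)
-- ===== Notes on version B (the rewrite author's own statement) =====
-- stated objective: alternative
-- what changed: Replaces sort-then-adjacent-scan with a single set pass: a candidate gap top is any element a>=1 whose predecessor a-1 is absent while some element lies below a-1; the answer is max(candidates)-1, else max+1 (A's in-place sort side effect is not reproduced).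
import Mathlib
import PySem

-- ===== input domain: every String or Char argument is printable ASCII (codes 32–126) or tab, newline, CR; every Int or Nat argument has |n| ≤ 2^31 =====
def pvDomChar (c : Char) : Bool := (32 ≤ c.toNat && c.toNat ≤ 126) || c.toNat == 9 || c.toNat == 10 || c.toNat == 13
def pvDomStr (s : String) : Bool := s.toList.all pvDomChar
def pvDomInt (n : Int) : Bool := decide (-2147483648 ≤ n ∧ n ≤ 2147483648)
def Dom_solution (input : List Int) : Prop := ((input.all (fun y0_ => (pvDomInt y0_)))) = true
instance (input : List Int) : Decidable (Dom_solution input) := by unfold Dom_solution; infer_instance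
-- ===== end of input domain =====

-- B replaces A's sort-and-adjacent-scan with a single set pass; equivalence is about the
-- RETURN value only (A sorts `input` in place, a caller-visible mutation B does not perform).

-- ===== PORT A =====
-- the for-loop over i in range(1, len(input)) reading input[i-1], input[i]:
-- the obvious structural recursion over the sorted list carrying the previous element
def solutionGo (prev : Int) : List Int → Option Int
  | [] => none
  | x :: rest =>
    if prev < 0 && x < 0 then none          -- break
    else if prev - x > 1 && prev - 1 ≥ 0 then some (prev - 1)   -- return input[i-1]-1
    else solutionGo x rest

def solution (input : List Int) : Int :=
  -- input.sort(reverse=True)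
  match PySem.List.sorted input (fun x => x) true with
  | [] => 0        -- Python raises IndexError (input[0]) here; excluded by Pre_solution
  | x :: rest =>
    match solutionGo x rest with
    | some v => v
    | none => x + 1    -- return input[0] + 1

-- ===== PORT B =====
def solution_alt (input : List Int) : Int :=
  let s := PySem.Set.ofList input
  let lo := match PySem.List.min? s (fun x => x) with
    | some m => m
    | none => 0      -- min(s) raises ValueError on empty; excluded by Pre_solution
  let cands := s.filter (fun a => decide (1 ≤ a) && !(PySem.Set.contains s (a - 1)) && decide (lo < a - 1))
  match PySem.List.max? cands (fun x => x) with
  | some m => m - 1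
  | none =>
    (match PySem.List.max? s (fun x => x) with | some m => m | none => 0) + 1

-- ===== PRECONDITION & SPEC =====
-- Pre_ excludes only the empty list, on which Python A raises IndexError (input[0]).
def Pre_solution (input : List Int) : Prop := input ≠ []
instance (input : List Int) : Decidable (Pre_solution input) := by unfold Pre_solution; infer_instance
def pvWitness_solution : List Int := ([4, 1, -2])

def Spec_solution (input : List Int) (out : Int) : Prop := out = solution_alt input
instance (input : List Int) (out : Int) : Decidable (Spec_solution input out) := by unfold Spec_solution; infer_instance

-- ===== CLAIM (what is proved, stated in full; the proofs are below) =====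
def Claim_equal_solution : Prop := ∀ (input : List Int), Dom_solution input → Pre_solution input → Spec_solution input (solution input)

-- ===== LEMMAS AND PROOFS =====

-- a is the top of a positive gap of the value multiset S
def GapTop (S : List Int) (a : Int) : Prop :=
  a ∈ S ∧ 1 ≤ a ∧ (a - 1) ∉ S ∧ ∃ b ∈ S, b < a - 1

theorem gapTop_congr {S T : List Int} (h : ∀ z : Int, z ∈ S ↔ z ∈ T) (a : Int) :
    GapTop S a ↔ GapTop T a := by
  unfold GapTop
  constructor
  · rintro ⟨h1, h2, h3, b, hb, hb2⟩
    exact ⟨(h a).1 h1, h2, fun hc => h3 ((h _).2 hc), b, (h b).1 hb, hb2⟩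
  · rintro ⟨h1, h2, h3, b, hb, hb2⟩
    exact ⟨(h a).2 h1, h2, fun hc => h3 ((h _).1 hc), b, (h b).2 hb, hb2⟩

-- characterization of A's scan on a descending list
theorem go_char (rest : List Int) : ∀ (x : Int),
    (x :: rest).Pairwise (fun a b => b ≤ a) →
    (match solutionGo x rest with
     | some v => GapTop (x :: rest) (v + 1) ∧ ∀ a, GapTop (x :: rest) a → a ≤ v + 1
     | none => ∀ a, ¬ GapTop (x :: rest) a) := by
  induction rest with
  | nil =>
    intro x _
    simp only [solutionGo]
    rintro a ⟨ha, _, _, b, hb, hlt⟩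
    simp at ha hb; omega
  | cons y r ih =>
    intro x hpw
    have hxy : y ≤ x := (List.pairwise_cons.1 hpw).1 y (by simp)
    have hpw' : (y :: r).Pairwise (fun a b => b ≤ a) := (List.pairwise_cons.1 hpw).2
    have hxall : ∀ z ∈ x :: y :: r, z ≤ x := by
      intro z hz
      rcases List.mem_cons.1 hz with h | h
      · omega
      · exact (List.pairwise_cons.1 hpw).1 z h
    have hyall : ∀ z ∈ y :: r, z ≤ y := by
      intro z hz
      rcases List.mem_cons.1 hz with h | h
      · omega
      · exact (List.pairwise_cons.1 hpw').1 z h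
    simp only [solutionGo]
    by_cases hbr : x < 0 && y < 0
    · simp only [hbr, if_true]
      rintro a ⟨ha, h1a, _, _⟩
      have := hxall a ha
      simp at hbr; omega
    · simp only [hbr]
      by_cases hret : x - y > 1 && x - 1 ≥ 0
      · simp only [hret, if_true]
        simp only [Bool.and_eq_true, decide_eq_true_eq] at hret
        constructor
        · refine ⟨by simp [show x - 1 + 1 = x by ring], by omega, ?_, y, by simp, by omega⟩
          intro hc
          rcases List.mem_cons.1 hc with h | h
          · omega
          · have := hyall _ h; omega
        · intro a ⟨ha, _, _, _⟩
          have := hxall a ha; omega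
      · simp only [hret]
        have hiff : ∀ a, GapTop (x :: y :: r) a ↔ GapTop (y :: r) a := by
          intro a
          unfold GapTop
          simp only [Bool.and_eq_true, decide_eq_true_eq, not_and] at hret
          constructor
          · rintro ⟨ha, h1a, hna, b, hb, hblt⟩
            have hax : a ≤ x := hxall a ha
            have hbx : b < x := by have := hxall b hb; omega
            have hb' : b ∈ y :: r := by
              rcases List.mem_cons.1 hb with h | h
              · omega
              · exact h
            have ha' : a ∈ y :: r := by
              rcases List.mem_cons.1 ha with h | h
              · -- a = x; then x ≥ 1 so x - y ≤ 1, and x-1 ∉ list forces y = x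
                have hxy1 : x - y ≤ 1 := by
                  by_contra hgt
                  exact absurd (by omega : (0:Int) ≤ x - 1) (hret (by omega))
                have hyne : y ≠ a - 1 := fun he => hna (by simp [← he])
                have : y = a := by omega
                simp [this]
              · exact h
            exact ⟨ha', h1a, fun hc => hna (by simp [hc]), b, hb', hblt⟩
          · rintro ⟨ha, h1a, hna, b, hb, hblt⟩
            have hay : a ≤ y := hyall a ha
            refine ⟨by simp [ha], h1a, ?_, b, by simp [hb], hblt⟩
            intro hc
            rcases List.mem_cons.1 hc with h | h
            · omega
            · exact hna h
        have := ih y hpw'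
        cases hgo : solutionGo y r with
        | some v =>
          rw [hgo] at this
          exact ⟨(hiff _).2 this.1, fun a ha => this.2 a ((hiff a).1 ha)⟩
        | none =>
          rw [hgo] at this
          intro a ha
          exact this a ((hiff a).1 ha)

-- membership in B's candidate list is exactly GapTop of the input
theorem mem_cands (input : List Int) (lo : Int)
    (hlo : lo ∈ input) (hmin : ∀ z ∈ input, lo ≤ z) (a : Int) :
    (a ∈ (PySem.Set.ofList input).filter
        (fun a => decide (1 ≤ a) && !(PySem.Set.contains (PySem.Set.ofList input) (a - 1)) && decide (lo < a - 1)))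
      ↔ GapTop input a := by
  simp only [List.mem_filter, Bool.and_eq_true, Bool.not_eq_true', decide_eq_true_eq,
    PySem.Set.mem_ofList, GapTop]
  constructor
  · rintro ⟨ha, ⟨h1, h2⟩, h3⟩
    refine ⟨ha, h1, ?_, lo, hlo, h3⟩
    intro hc
    rw [show (PySem.Set.contains (PySem.Set.ofList input) (a-1)) = true from
      (PySem.Set.contains_iff _ _).2 ((PySem.Set.mem_ofList _ _).2 hc)] at h2
    exact absurd h2 (by simp)
  · rintro ⟨ha, h1, h2, b, hb, hblt⟩
    refine ⟨ha, ⟨h1, ?_⟩, by have := hmin b hb; omega⟩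
    by_contra hc
    simp only [Bool.not_eq_false] at hc
    exact h2 ((PySem.Set.mem_ofList _ _).1 ((PySem.Set.contains_iff _ _).1 hc))

-- ===== VERDICT (by name: the statement is the Claim_ definition above) =====
theorem solution_spec : Claim_equal_solution := by
  intro input _ hpre
  unfold Spec_solution
  cases hd : PySem.List.sorted input (fun x => x) true with
  | nil => exact absurd ((PySem.List.sorted_eq_nil_iff _ _ _).1 hd) hpre
  | cons x rest =>
    have hmemd : ∀ z : Int, z ∈ x :: rest ↔ z ∈ input := by
      intro z; rw [← hd]; exact PySem.List.mem_sorted _ _ _ _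
    have hpw : (x :: rest).Pairwise (fun a b => b ≤ a) := by
      have := PySem.List.sorted_pairwise_rev input (fun x : Int => x)
      rw [hd] at this; simpa using this
    have hx : x ∈ input := (hmemd x).1 (by simp)
    have hxmax : ∀ z ∈ input, z ≤ x := by
      intro z hz
      have := PySem.List.key_head_sorted_rev_ge input (fun x : Int => x) hd z hz
      simpa using this
    have hxs : x ∈ PySem.Set.ofList input := (PySem.Set.mem_ofList _ _).2 hx
    cases hmin : PySem.List.min? (PySem.Set.ofList input) (fun x => x) with
    | none =>
      rw [PySem.List.min?_eq_none_iff] at hmin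
      rw [hmin] at hxs; simp at hxs
    | some lo =>
      have hlo : lo ∈ input := (PySem.Set.mem_ofList _ _).1 (PySem.List.min?_mem hmin)
      have hlomin : ∀ z ∈ input, lo ≤ z := by
        intro z hz
        have := PySem.List.min?_isMin hmin z ((PySem.Set.mem_ofList _ _).2 hz)
        simpa using this
      have hcands := mem_cands input lo hlo hlomin
      have hchar := go_char rest x hpw
      cases hgo : solutionGo x rest with
      | some v =>
        rw [hgo] at hchar
        obtain ⟨hgt, hmax⟩ := hchar
        have hgt' : GapTop input (v + 1) := (gapTop_congr hmemd _).1 hgt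
        have hvc : (v + 1) ∈ (PySem.Set.ofList input).filter
            (fun a => decide (1 ≤ a) && !(PySem.Set.contains (PySem.Set.ofList input) (a - 1)) && decide (lo < a - 1)) :=
          (hcands (v+1)).2 hgt'
        have key : PySem.List.max? ((PySem.Set.ofList input).filter
            (fun a => decide (1 ≤ a) && !(PySem.Set.contains (PySem.Set.ofList input) (a - 1)) && decide (lo < a - 1)))
            (fun x => x) = some (v + 1) := by
          cases hmx : PySem.List.max? ((PySem.Set.ofList input).filter
              (fun a => decide (1 ≤ a) && !(PySem.Set.contains (PySem.Set.ofList input) (a - 1)) && decide (lo < a - 1)))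
              (fun x => x) with
          | none =>
            rw [PySem.List.max?_eq_none_iff] at hmx
            rw [hmx] at hvc; simp at hvc
          | some m =>
            have hm : GapTop input m := (hcands m).1 (PySem.List.max?_mem hmx)
            have hmle : m ≤ v + 1 := hmax m ((gapTop_congr hmemd m).2 hm)
            have hvm : (v + 1 : Int) ≤ m := by
              have := PySem.List.max?_isMax hmx (v+1) hvc
              simpa using this
            have : m = v + 1 := by omega
            rw [this]
        have hA : solution input = v := by simp only [solution, hd, hgo]
        have hB : solution_alt input = v := by
          simp only [solution_alt, hmin, key]
          omega
        rw [hA, hB]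
      | none =>
        rw [hgo] at hchar
        have hnone : ∀ a : Int, ¬ GapTop input a := fun a ha =>
          hchar a ((gapTop_congr hmemd a).2 ha)
        have hfil : (PySem.Set.ofList input).filter
            (fun a => decide (1 ≤ a) && !(PySem.Set.contains (PySem.Set.ofList input) (a - 1)) && decide (lo < a - 1)) = [] := by
          rw [List.eq_nil_iff_forall_not_mem]
          intro a ha
          exact hnone a ((hcands a).1 ha)
        have hmaxs : PySem.List.max? (PySem.Set.ofList input) (fun x => x) = some x := by
          cases hmx : PySem.List.max? (PySem.Set.ofList input) (fun x => x) with
          | none =>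
            rw [PySem.List.max?_eq_none_iff] at hmx
            rw [hmx] at hxs; simp at hxs
          | some m =>
            have hm : m ∈ input := (PySem.Set.mem_ofList _ _).1 (PySem.List.max?_mem hmx)
            have h1 : m ≤ x := hxmax m hm
            have h2 : x ≤ m := by
              have := PySem.List.max?_isMax hmx x hxs
              simpa using this
            have : m = x := by omega
            rw [this]
        have hA : solution input = x + 1 := by simp only [solution, hd, hgo]
        have hB : solution_alt input = x + 1 := by
          simp only [solution_alt, hmin, hfil, hmaxs]
          simp [PySem.List.max?]
        rw [hA, hB]
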